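-- pv_equiv track=rewrite | github.com/emmaneugene/practice | assessments/lotteryCoupons.py | lotteryCoupons
-- ===== SOURCE A (Python) =====
-- def compute_digit_sum(i: int) -> int:
--     total: int = 0
--     while i > 0:
--         total += i % 10
--         i //= 10
--
--     return total
--
-- def lotteryCoupons(n: int) -> int:
--     sum_of_digits = [compute_digit_sum(i) for i in range(1, n+1)]
--     # alternatively, use map()
--     # sum_of_digits = list(map(compute_digit_sum, sum_of_digits))
--     coupon_counts = {}
--
--     for i in sum_of_digits:
--         if i in coupon_counts:
--             coupon_counts[i] += 1
--         else:
--             coupon_counts[i] = 1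
--
--     highest_count: int = 0
--     num_values_of_s: int = 0
--
--     for coupon, count in coupon_counts.items():
--         if count > highest_count:
--             highest_count = count
--             num_values_of_s = 1
--         elif count == highest_count:
--             num_values_of_s += 1
--
--     return num_values_of_s
-- ===== SOURCE B (Python) =====
-- def lotteryCoupons(n: int) -> int:
--     # Digit DP: count integers in [0, m] with digit sum s, memoized, instead of
--     # enumerating every i in 1..n.
--     if n <= 0:
--         return 0
--     memo = {}
--
--     def f(m: int, s: int) -> int:
--         # number of integers q in [0, m] whose digit sum is s
--         if m < 0 or s < 0:
--             return 0
--         if m == 0: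
--             return 1 if s == 0 else 0
--         key = (m, s)
--         if key not in memo:
--             memo[key] = sum(f((m - r) // 10, s - r) for r in range(10))
--         return memo[key]
--
--     max_s = 0
--     t = n
--     while t > 0:
--         max_s += 9
--         t //= 10
--     counts = [f(n, s) for s in range(1, max_s + 1)]
--     best = max(counts)
--     return sum(1 for c in counts if c == best)
-- ===== Notes on version B (the rewrite author's own statement) =====
-- stated objective: faster
-- what changed: B replaces A's enumeration of every integer 1..n (computing each digit sum and tallying it in a dict, then a max-tracking scan) by a memoised digit-DP recursion f(m,s) counting the integers in [0,m] with digit sum s for each possible sum value, then counting the values that attain the maximal count.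
import Mathlib
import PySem

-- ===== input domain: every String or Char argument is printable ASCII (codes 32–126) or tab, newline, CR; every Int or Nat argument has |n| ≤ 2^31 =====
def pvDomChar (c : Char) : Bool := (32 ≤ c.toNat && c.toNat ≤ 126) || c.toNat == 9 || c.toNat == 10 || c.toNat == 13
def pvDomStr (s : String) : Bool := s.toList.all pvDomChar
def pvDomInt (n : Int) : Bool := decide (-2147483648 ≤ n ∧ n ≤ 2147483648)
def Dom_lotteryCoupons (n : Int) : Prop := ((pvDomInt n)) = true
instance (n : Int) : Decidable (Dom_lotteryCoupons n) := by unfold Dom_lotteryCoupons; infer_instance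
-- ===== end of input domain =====

-- B replaces A's per-integer enumeration of 1..n by a memoised digit-DP count of
-- integers per digit-sum value (objective: faster, asymptotic).

-- ===== PORT A =====
-- while i > 0: total += i % 10; i //= 10
def csLoop (i total : Int) : Int :=
  if 0 < i then csLoop (PySem.Int.floordiv i 10) (total + PySem.Int.mod i 10) else total
termination_by i.toNat
decreasing_by
  rw [PySem.Int.floordiv_eq_ediv_of_pos (by norm_num)]
  omega

def computeDigitSum (i : Int) : Int := csLoop i 0

def lotteryCoupons (n : Int) : Int :=
  let sumOfDigits := (PySem.List.pyRange 1 (n + 1)).map computeDigitSum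
  let couponCounts := sumOfDigits.foldl
    (fun d i => if d.contains i then d.insert i (d.getD i 0 + 1) else d.insert i 1)
    PySem.Dict.empty
  let res := couponCounts.items.foldl
    (fun (acc : Int × Int) kv =>
      if kv.2 > acc.1 then (kv.2, 1)
      else if kv.2 = acc.1 then (acc.1, acc.2 + 1)
      else acc)
    (0, 0)
  res.2

-- ===== PORT B =====
-- while t > 0: max_s += 9; t //= 10
def msLoop (t maxS : Int) : Int :=
  if 0 < t then msLoop (PySem.Int.floordiv t 10) (maxS + 9) else maxS
termination_by t.toNat
decreasing_by
  rw [PySem.Int.floordiv_eq_ediv_of_pos (by norm_num)]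
  omega

-- f(m, s) = number of integers q in [0, m] with digit sum s (Source B memoises the
-- same recursion; the recursion itself is ported verbatim, `attach` only carries
-- the membership fact needed for termination)
def fB (m s : Int) : Int :=
  if m < 0 ∨ s < 0 then 0
  else if m = 0 then (if s = 0 then 1 else 0)
  else ((PySem.List.pyRange 0 10).attach.map
        (fun r => fB (PySem.Int.floordiv (m - r.1) 10) (s - r.1))).sum
termination_by m.toNat
decreasing_by
  rename_i h1 h2
  have hr := PySem.List.mem_pyRange_one.mp r.2
  rw [PySem.Int.floordiv_eq_ediv_of_pos (by norm_num)]
  omega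

def lotteryCoupons_alt (n : Int) : Int :=
  if n ≤ 0 then 0
  else
    let maxS := msLoop n 0
    let counts := (PySem.List.pyRange 1 (maxS + 1)).map (fun s => fB n s)
    -- max(counts): counts is never empty here (maxS ≥ 9), so the .getD 0 never fires
    let best := (PySem.List.max? counts id).getD 0
    counts.foldl (fun acc c => if c = best then acc + 1 else acc) 0

-- ===== PRECONDITION & SPEC =====
def Spec_lotteryCoupons (n : Int) (out : Int) : Prop := out = lotteryCoupons_alt n
instance (n : Int) (out : Int) : Decidable (Spec_lotteryCoupons n out) := by unfold Spec_lotteryCoupons; infer_instance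

-- ===== CLAIM (what is proved, stated in full; the proofs are below) =====
def Claim_equal_lotteryCoupons : Prop := ∀ (n : Int), Dom_lotteryCoupons n → Spec_lotteryCoupons n (lotteryCoupons n)

-- ===== LEMMAS AND PROOFS =====

-- digit sum and digit count of a natural number (proof-side spec)
def dsN (m : Nat) : Nat := if m = 0 then 0 else m % 10 + dsN (m / 10)
def numD (m : Nat) : Nat := if m = 0 then 0 else numD (m / 10) + 1
-- number of q in [0, N] with digit sum s
def cntF (N : Nat) (s : Int) : Nat :=
  ((Finset.range (N + 1)).filter (fun q => (dsN q : Int) = s)).card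

theorem dsN_zero : dsN 0 = 0 := by rw [dsN]; simp

theorem dsN_eq (m : Nat) : dsN m = m % 10 + dsN (m / 10) := by
  by_cases h : m = 0
  · subst h; simp [dsN_zero]
  · conv_lhs => rw [dsN]
    simp [h]
theorem dsN_pos (m : Nat) (h : 1 ≤ m) : 1 ≤ dsN m := by
  induction m using Nat.strong_induction_on with
  | _ m ih =>
    rw [dsN_eq m]
    rcases Nat.eq_zero_or_pos (m % 10) with h0 | h0
    · have hd : 1 ≤ m / 10 := by omega
      have := ih (m / 10) (by omega) hd
      omega
    · omega
theorem dsN_le (m : Nat) : dsN m ≤ 9 * numD m := by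
  induction m using Nat.strong_induction_on with
  | _ m ih =>
    by_cases h : m = 0
    · subst h; rw [dsN_zero, numD]; simp
    · rw [dsN_eq m, numD, if_neg h]
      have := ih (m / 10) (by omega)
      omega
theorem numD_mono {i j : Nat} (h : i ≤ j) : numD i ≤ numD j := by
  induction j using Nat.strong_induction_on generalizing i with
  | _ j ih =>
    by_cases hi : i = 0
    · subst hi; rw [numD]; simp
    · have hj : j ≠ 0 := by omega
      conv_rhs => rw [numD]
      conv_lhs => rw [numD]
      rw [if_neg hi, if_neg hj]
      have := ih (j / 10) (by omega) (i := i / 10) (by exact Nat.div_le_div_right h)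
      omega

theorem csLoop_eq (m : Nat) (t : Int) : csLoop (m : Int) t = t + (dsN m : Int) := by
  induction m using Nat.strong_induction_on generalizing t with
  | _ m ih =>
    rw [csLoop]
    by_cases h : 0 < m
    · rw [if_pos (by exact_mod_cast h)]
      have hf : PySem.Int.floordiv (m : Int) 10 = ((m / 10 : Nat) : Int) := by
        exact_mod_cast PySem.Int.floordiv_natCast m 10
      have hm : PySem.Int.mod (m : Int) 10 = ((m % 10 : Nat) : Int) := by
        exact_mod_cast PySem.Int.mod_natCast m 10
      rw [hf, hm, ih (m / 10) (by omega)]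
      rw [dsN_eq m]
      push_cast
      ring
    · have hm : m = 0 := by omega
      subst hm
      rw [if_neg (by omega)]
      simp [dsN_zero]
theorem csd_cast (m : Nat) : computeDigitSum (m : Int) = (dsN m : Int) := by
  unfold computeDigitSum
  rw [csLoop_eq m 0]
  ring
theorem msLoop_eq (m : Nat) (acc : Int) : msLoop (m : Int) acc = acc + 9 * (numD m : Int) := by
  induction m using Nat.strong_induction_on generalizing acc with
  | _ m ih =>
    rw [msLoop]
    by_cases h : 0 < m
    · rw [if_pos (by exact_mod_cast h)]
      have hf : PySem.Int.floordiv (m : Int) 10 = ((m / 10 : Nat) : Int) := by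
        exact_mod_cast PySem.Int.floordiv_natCast m 10
      rw [hf, ih (m / 10) (by omega)]
      conv_rhs => rw [numD, if_neg (by omega : ¬ m = 0)]
      push_cast
      ring
    · have hm : m = 0 := by omega
      subst hm
      rw [if_neg (by omega)]
      rw [numD]
      simp

theorem pyRange_one_map (N : Nat) :
    PySem.List.pyRange 1 ((N : Int) + 1) = (List.range N).map (fun j => ((j + 1 : Nat) : Int)) := by
  induction N with
  | zero => rfl
  | succ k ih =>
    have h1 : ((k + 1 : Nat) : Int) + 1 = ((k : Int) + 1) + 1 := by push_cast; ring
    rw [h1, PySem.List.pyRange_one_succ_right (by omega), ih, List.range_succ]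
    simp
theorem pyRange_one_nil (a b : Int) (h : b ≤ a) : PySem.List.pyRange a b = [] := by
  apply List.eq_nil_iff_forall_not_mem.mpr
  intro x hx
  have := PySem.List.mem_pyRange_one.mp hx
  omega

theorem cntF_neg (N : Nat) (s : Int) (h : s < 0) : cntF N s = 0 := by
  unfold cntF
  rw [Finset.card_eq_zero]
  apply Finset.filter_eq_empty_iff.mpr
  intro q _ hq
  omega

def fib (N : Nat) (s : Int) (r : Nat) : Nat :=
  ((Finset.range (N + 1)).filter (fun q => (dsN q : Int) = s ∧ q % 10 = r)).card

theorem cnt_decomp (N : Nat) (s : Int) :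
    cntF N s = ∑ r ∈ Finset.range 10, fib N s r := by
  unfold cntF fib
  rw [Finset.card_eq_sum_card_fiberwise (f := fun q => q % 10) (t := Finset.range 10)
    (fun q _ => Finset.mem_range.mpr (Nat.mod_lt q (by norm_num)))]
  apply Finset.sum_congr rfl
  intro r _
  rw [Finset.filter_filter]

theorem fib_empty (N : Nat) (s : Int) (r : Nat) (h : N < r) : fib N s r = 0 := by
  unfold fib
  rw [Finset.card_eq_zero]
  apply Finset.filter_eq_empty_iff.mpr
  intro q hq
  have hq' := Finset.mem_range.mp hq
  intro ⟨_, h2⟩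
  have := Nat.mod_le q 10
  omega

theorem fib_bij (N : Nat) (s : Int) (r : Nat) (hr : r < 10) (hrN : r ≤ N) :
    fib N s r = cntF ((N - r) / 10) (s - (r : Int)) := by
  unfold fib cntF
  refine Finset.card_bij' (fun q _ => q / 10) (fun a _ => 10 * a + r) ?hi ?hj ?li ?ri
  case hi =>
    dsimp only
    intro q hq
    obtain ⟨hq1, hq2, hq3⟩ := Finset.mem_filter.mp hq
    have hq1' := Finset.mem_range.mp hq1
    apply Finset.mem_filter.mpr
    refine ⟨Finset.mem_range.mpr (by omega), ?_⟩
    have hd : dsN q = q % 10 + dsN (q / 10) := dsN_eq q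
    have hd' : (dsN q : Int) = ((q % 10 : Nat) : Int) + ((dsN (q / 10) : Nat) : Int) := by
      exact_mod_cast hd
    rw [hq3] at hd'
    omega
  case hj =>
    dsimp only
    intro a ha
    obtain ⟨ha1, ha2⟩ := Finset.mem_filter.mp ha
    have ha1' := Finset.mem_range.mp ha1
    apply Finset.mem_filter.mpr
    have h1 : (10 * a + r) % 10 = r := by omega
    have h2 : (10 * a + r) / 10 = a := by omega
    refine ⟨Finset.mem_range.mpr (by omega), ?_, h1⟩
    have hd : dsN (10 * a + r) = r + dsN a := by
      rw [dsN_eq (10 * a + r), h1, h2]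
    have hd' : (dsN (10 * a + r) : Int) = ((r : Nat) : Int) + ((dsN a : Nat) : Int) := by
      exact_mod_cast hd
    omega
  case li =>
    dsimp only
    intro q hq
    obtain ⟨_, _, hq3⟩ := Finset.mem_filter.mp hq
    omega
  case ri =>
    dsimp only
    intro a _
    omega

theorem fB_correct (N : Nat) (s : Int) (hs : 0 ≤ s) : fB (N : Int) s = (cntF N s : Int) := by
  induction N using Nat.strong_induction_on generalizing s with
  | _ N ih =>
    have h00 : cntF 0 s = if s = 0 then 1 else 0 := by
      unfold cntF
      rw [Finset.range_one, Finset.filter_singleton]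
      by_cases h0 : s = 0
      · rw [if_pos (by rw [h0, dsN_zero]; rfl), if_pos h0, Finset.card_singleton]
      · rw [if_neg (by rw [dsN_zero]; exact fun hc => h0 (by exact_mod_cast hc.symm)),
            if_neg h0, Finset.card_empty]
    by_cases hN : N = 0
    · subst hN
      have hb : fB ((0 : Nat) : Int) s = if s = 0 then 1 else 0 := by
        rw [fB]
        rw [if_neg (show ¬(((0 : Nat) : Int) < 0 ∨ s < 0) by omega)]
        rw [if_pos (show ((0 : Nat) : Int) = 0 by norm_num)]
      rw [hb, h00]
      by_cases h0 : s = 0 <;> simp [h0]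
    · rw [fB, if_neg (by omega), if_neg (by exact_mod_cast hN)]
      have hterm : ∀ r : Nat, r < 10 →
          fB (PySem.Int.floordiv ((N : Int) - (r : Int)) 10) (s - (r : Int)) = (fib N s r : Int) := by
        intro r hr
        by_cases hrN : r ≤ N
        · rw [show ((N : Int) - (r : Int)) = ((N - r : Nat) : Int) by omega]
          have hf : PySem.Int.floordiv ((N - r : Nat) : Int) 10 = (((N - r) / 10 : Nat) : Int) := by
            exact_mod_cast PySem.Int.floordiv_natCast (N - r) 10
          rw [hf]
          by_cases hsr : 0 ≤ s - (r : Int)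
          · rw [ih ((N - r) / 10) (by omega) (s - (r : Int)) hsr]
            exact_mod_cast (congrArg (fun k : Nat => (k : Int)) (fib_bij N s r hr hrN)).symm
          · rw [fB, if_pos (Or.inr (by omega))]
            rw [fib_bij N s r hr hrN, cntF_neg _ _ (by omega)]
            simp
        · have hfd : PySem.Int.floordiv ((N : Int) - (r : Int)) 10 = -1 := by
            rw [PySem.Int.floordiv_eq_iff_of_pos (by norm_num)]
            omega
          rw [hfd, fB, if_pos (Or.inl (by norm_num))]
          rw [fib_empty N s r (by omega)]
          simp
      have hca : ((PySem.List.pyRange 0 10).attach.map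
            (fun r => fB (PySem.Int.floordiv ((N : Int) - r.1) 10) (s - r.1))).sum
          = ((PySem.List.pyRange 0 10).map
            (fun r => fB (PySem.Int.floordiv ((N : Int) - r) 10) (s - r))).sum := by
        simp
      have h10 : PySem.List.pyRange 0 10 = (List.range 10).map (fun k : Nat => (k : Int)) :=
        PySem.List.pyRange_zero_natCast 10
      rw [hca, h10, List.map_map]
      have hmc : ((List.range 10).map
            ((fun r => fB (PySem.Int.floordiv ((N : Int) - r) 10) (s - r)) ∘ (fun k : Nat => (k : Int))))
          = (List.range 10).map (fun r : Nat => (fib N s r : Int)) := by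
        apply List.map_congr_left
        intro r hrm
        exact hterm r (List.mem_range.mp hrm)
      rw [hmc]
      have hsum : ((List.range 10).map (fun r : Nat => (fib N s r : Int))).sum
          = ∑ r ∈ Finset.range 10, (fib N s r : Int) := rfl
      rw [hsum, cnt_decomp N s]
      push_cast
      rfl

theorem maxfold (l : List (Int × Int)) (h m : Int) :
    l.foldl (fun p kv => if kv.2 > p.1 then (kv.2, 1) else if kv.2 = p.1 then (p.1, p.2 + 1) else p) (h, m)
      = ((l.map Prod.snd).foldl max h,
         ((l.countP (fun kv => kv.2 == (l.map Prod.snd).foldl max h)) : Int)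
           + if (l.map Prod.snd).foldl max h = h then m else 0) := by
  induction l generalizing h m with
  | nil => simp
  | cons kv t ih =>
    simp only [List.map_cons, List.foldl_cons, List.countP_cons]
    have hle := (PySem.List.le_foldl_max (t.map Prod.snd) (max h kv.2)).1
    by_cases h1 : kv.2 > h
    · have hmax : max h kv.2 = kv.2 := by omega
      rw [if_pos h1, ih kv.2 1]
      simp only [hmax] at hle ⊢
      rw [if_neg (show (t.map Prod.snd).foldl max kv.2 ≠ h by omega)]
      rw [Prod.mk.injEq]
      refine ⟨rfl, ?_⟩
      have e1 : (if (t.map Prod.snd).foldl max kv.2 = kv.2 then (1:Int) else 0)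
          = (if (kv.2 == (t.map Prod.snd).foldl max kv.2) = true then 1 else 0) := by
        simp only [beq_iff_eq]
        by_cases h2 : (t.map Prod.snd).foldl max kv.2 = kv.2
        · rw [if_pos h2, if_pos h2.symm]
        · rw [if_neg h2, if_neg (fun hc => h2 hc.symm)]
      push_cast
      rw [e1]
      ring
    · by_cases h2 : kv.2 = h
      · rw [if_neg h1, if_pos h2, ih h (m + 1)]
        simp only [h2, max_self] at hle ⊢
        rw [Prod.mk.injEq]
        refine ⟨rfl, ?_⟩
        by_cases h3 : (t.map Prod.snd).foldl max h = h
        · rw [if_pos h3, if_pos h3, if_pos (by simp [h3])]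
          push_cast
          ring
        · rw [if_neg h3, if_neg h3, if_neg (by simp only [beq_iff_eq]; exact fun hc => h3 hc.symm)]
          push_cast
          ring
      · rw [if_neg h1, if_neg h2, ih h m]
        simp only [max_eq_left (by omega : kv.2 ≤ h)] at hle ⊢
        rw [Prod.mk.injEq]
        refine ⟨rfl, ?_⟩
        rw [if_neg (show (kv.2 == (t.map Prod.snd).foldl max h) = true → False by
          simp only [beq_iff_eq]; omega)]
        push_cast
        ring

theorem foldl_max_mem (l : List Int) (a : Int) : l.foldl max a = a ∨ l.foldl max a ∈ l := by
  induction l generalizing a with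
  | nil => left; rfl
  | cons x t ih =>
    simp only [List.foldl_cons]
    rcases ih (max a x) with h | h
    · rcases max_choice a x with hm | hm
      · left; exact h.trans hm
      · right; rw [h.trans hm]; exact List.mem_cons_self
    · right; exact List.mem_cons_of_mem _ h

theorem cntF_count (N : Nat) (s : Int) (hs : 1 ≤ s) :
    (cntF N s : Nat) = (List.range N).countP (fun j => decide ((dsN (j + 1) : Int) = s)) := by
  unfold cntF
  have hb : ((Finset.range (N+1)).filter (fun q => (dsN q : Int) = s)).card
      = (List.range (N+1)).countP (fun q => decide ((dsN q : Int) = s)) := by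
    simp [Finset.card, Finset.filter, Multiset.range, List.countP_eq_length_filter]
  rw [hb, List.range_succ_eq_map]
  rw [List.countP_cons, List.countP_map]
  have h0 : (decide ((dsN 0 : Int) = s)) = false := by
    simp [dsN_zero]; omega
  simp only [h0, Function.comp_def]
  simp

theorem numD_pos (m : Nat) (h : 1 ≤ m) : 1 ≤ numD m := by
  rw [numD, if_neg (by omega)]
  omega

theorem dsN_one : dsN 1 = 1 := by
  rw [dsN_eq]
  norm_num [dsN_zero]

theorem main_pos (N : Nat) (hN1 : 1 ≤ N) :
    lotteryCoupons ((N : Int)) = lotteryCoupons_alt ((N : Int)) := by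
  -- the list of digit sums of 1..N, as A computes it
  have hsds : (PySem.List.pyRange 1 ((N : Int) + 1)).map computeDigitSum
      = (List.range N).map (fun j => ((dsN (j + 1) : Nat) : Int)) := by
    rw [pyRange_one_map N, List.map_map]
    apply List.map_congr_left
    intro j _
    exact csd_cast (j + 1)
  set sds := (List.range N).map (fun j => ((dsN (j + 1) : Nat) : Int)) with hsdsdef
  set K := PySem.Set.ofList sds with hKdef
  set M := ((K.map (fun k => ((sds.count k : Nat) : Int))).foldl max 0) with hMdef
  have hcBcnt : ∀ s : Int, 1 ≤ s → (cntF N s : Nat) = sds.count s := by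
    intro s hs
    rw [cntF_count N s hs, hsdsdef, List.count_eq_countP, List.countP_map]
    apply List.countP_congr
    intro i _
    simp [Function.comp]
  have hmem_sds : ∀ k : Int, k ∈ sds ↔ ∃ i, i < N ∧ ((dsN (i + 1) : Nat) : Int) = k := by
    intro k
    rw [hsdsdef]
    simp [List.mem_map, List.mem_range]
  have hKmem : ∀ k : Int, k ∈ K ↔ k ∈ sds := fun k => PySem.Set.mem_ofList sds k
  -- ===== side A =====
  have hA : lotteryCoupons (N : Int)
      = ((K.countP (fun k => (((sds.count k : Nat) : Int) == M))) : Int) := by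
    rw [lotteryCoupons]
    simp only [hsds]
    have hstep : (fun (d : PySem.Dict Int Int) i =>
          if d.contains i then d.insert i (d.getD i 0 + 1) else d.insert i 1)
        = fun d x => d.insert x (d.getD x 0 + 1) := by
      funext d i
      by_cases hc : d.contains i
      · rw [if_pos hc]
      · rw [if_neg hc, PySem.Dict.getD_of_not_contains d 0 (by simpa using hc)]
        norm_num
    rw [hstep, PySem.Dict.foldl_insert_getD_add_one_eq_counter, PySem.Dict.items_counter]
    rw [maxfold]
    simp only [List.map_map, List.countP_map, Function.comp_def]
    rw [ite_self, add_zero]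
  -- ===== side B =====
  set D := 9 * numD N with hDdef
  have hD9 : 9 ≤ D := by
    have := numD_pos N hN1
    omega
  have hms : msLoop (N : Int) 0 = ((D : Nat) : Int) := by
    rw [msLoop_eq]
    push_cast [hDdef]
    ring
  have hcounts : (PySem.List.pyRange 1 (((D : Nat) : Int) + 1)).map (fun s => fB (N : Int) s)
      = (List.range D).map (fun j => ((sds.count ((j + 1 : Nat) : Int) : Nat) : Int)) := by
    rw [pyRange_one_map D, List.map_map]
    apply List.map_congr_left
    intro j _
    show fB (N : Int) ((j + 1 : Nat) : Int) = _
    rw [fB_correct N _ (by positivity),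
        hcBcnt ((j + 1 : Nat) : Int) (by exact_mod_cast Nat.succ_le_succ (Nat.zero_le j))]
  set counts := (List.range D).map (fun j => ((sds.count ((j + 1 : Nat) : Int) : Nat) : Int)) with hcountsdef
  obtain ⟨b, hb⟩ : ∃ b, PySem.List.max? counts id = some b := by
    cases hmax : PySem.List.max? counts id with
    | none =>
      exfalso
      have hnil := (PySem.List.max?_eq_none_iff counts id).mp hmax
      rw [hcountsdef] at hnil
      have := congrArg List.length hnil
      simp at this
      omega
    | some b => exact ⟨b, rfl⟩
  -- shared facts
  have hK1 : (1 : Int) ∈ sds := (hmem_sds 1).mpr ⟨0, by omega, by norm_num [dsN_one]⟩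
  have hbound : ∀ k : Int, k ∈ sds → 1 ≤ k ∧ k ≤ (D : Int) := by
    intro k hk
    obtain ⟨i, hiN, hik⟩ := (hmem_sds k).mp hk
    rw [← hik]
    constructor
    · exact_mod_cast dsN_pos (i + 1) (by omega)
    · have h1 := dsN_le (i + 1)
      have h2 := numD_mono (show i + 1 ≤ N by omega)
      have : dsN (i + 1) ≤ D := by rw [hDdef]; omega
      exact_mod_cast this
  have hMfacts := PySem.List.le_foldl_max (K.map (fun k => ((sds.count k : Nat) : Int))) 0
  have hM1 : (1 : Int) ≤ M := by
    have h1K : (1 : Int) ∈ K := (hKmem 1).mpr hK1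
    have hmm : ((sds.count (1 : Int) : Nat) : Int) ∈ K.map (fun k => ((sds.count k : Nat) : Int)) :=
      List.mem_map_of_mem h1K
    have hle := hMfacts.2 _ hmm
    have hc1 : 0 < sds.count (1 : Int) := List.count_pos_iff.mpr hK1
    omega
  have hMmem : ∃ k0 ∈ K, ((sds.count k0 : Nat) : Int) = M := by
    rcases foldl_max_mem (K.map (fun k => ((sds.count k : Nat) : Int))) 0 with h | h
    · rw [hMdef] at *; omega
    · rcases List.mem_map.mp h with ⟨k0, hk0, hval⟩
      exact ⟨k0, hk0, hval⟩
  have hbmem := PySem.List.max?_mem hb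
  have hbub : ∀ y ∈ counts, y ≤ b := fun y hy => PySem.List.max?_isMax hb y hy
  have hbM : b = M := by
    rcases List.mem_map.mp hbmem with ⟨j, hjr, hjb⟩
    have hjD := List.mem_range.mp hjr
    have hble : b ≤ M := by
      by_cases hz : 0 < sds.count ((j + 1 : Nat) : Int)
      · have hmemK : ((j + 1 : Nat) : Int) ∈ K := (hKmem _).mpr (List.count_pos_iff.mp hz)
        have hmm : ((sds.count ((j + 1 : Nat) : Int) : Nat) : Int)
            ∈ K.map (fun k => ((sds.count k : Nat) : Int)) := List.mem_map_of_mem hmemK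
        have := hMfacts.2 _ hmm
        omega
      · omega
    have hMleb : M ≤ b := by
      rcases hMmem with ⟨k0, hk0K, hk0M⟩
      have hk0sds := (hKmem k0).mp hk0K
      have hbnd := hbound k0 hk0sds
      have harg : ((k0.toNat - 1 + 1 : Nat) : Int) = k0 := by omega
      have hcmem : ((sds.count k0 : Nat) : Int) ∈ counts := by
        rw [hcountsdef]
        apply List.mem_map.mpr
        refine ⟨k0.toNat - 1, List.mem_range.mpr (by omega), ?_⟩
        rw [harg]
      have := hbub _ hcmem
      omega
    omega
  have hBval : lotteryCoupons_alt (N : Int)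
      = ((counts.countP (fun x => (x == M))) : Int) := by
    rw [lotteryCoupons_alt, if_neg (by omega)]
    simp only [hms, hcounts, hb, Option.getD_some]
    rw [hbM]
    have hfold : (fun (acc : Int) c => if c = M then acc + 1 else acc)
        = (fun (acc : Int) c => if ((fun x => x == M) c) = true then acc + 1 else acc) := by
      funext acc c
      by_cases h : c = M <;> simp [h]
    rw [hfold, PySem.List.foldl_count_if, zero_add]
  -- ===== the two counts agree =====
  have hSnodup : ((List.range D).map (fun j => ((j + 1 : Nat) : Int))).Nodup := by
    apply List.Nodup.map
    · intro a bb hab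
      push_cast at hab
      omega
    · exact List.nodup_range
  have hcntKS : K.countP (fun k => (((sds.count k : Nat) : Int) == M))
      = ((List.range D).map (fun j => ((j + 1 : Nat) : Int))).countP
          (fun k => (((sds.count k : Nat) : Int) == M)) := by
    rw [List.countP_eq_length_filter, List.countP_eq_length_filter]
    apply List.Perm.length_eq
    apply (List.perm_ext_iff_of_nodup (List.Nodup.filter _ (PySem.Set.nodup_ofList sds))
      (List.Nodup.filter _ hSnodup)).mpr
    intro x
    simp only [List.mem_filter]
    constructor
    · rintro ⟨hxK, hxP⟩
      refine ⟨?_, hxP⟩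
      have hxs := (hKmem x).mp hxK
      have hbx := hbound x hxs
      apply List.mem_map.mpr
      exact ⟨x.toNat - 1, List.mem_range.mpr (by omega), by omega⟩
    · rintro ⟨hxS, hxP⟩
      refine ⟨?_, hxP⟩
      have hxM : ((sds.count x : Nat) : Int) = M := by simpa using hxP
      have hxpos : 0 < sds.count x := by omega
      exact (hKmem x).mpr (List.count_pos_iff.mp hxpos)
  have hcntSc : ((List.range D).map (fun j => ((j + 1 : Nat) : Int))).countP
        (fun k => (((sds.count k : Nat) : Int) == M))
      = counts.countP (fun x => (x == M)) := by
    rw [List.countP_map, hcountsdef, List.countP_map]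
    simp [Function.comp_def]
  rw [hA, hBval, hcntKS, hcntSc]

-- ===== VERDICT (by name: the statement is the Claim_ definition above) =====
theorem lotteryCoupons_spec : Claim_equal_lotteryCoupons := by
  intro n _
  unfold Spec_lotteryCoupons
  by_cases hn : n ≤ 0
  · rw [lotteryCoupons, lotteryCoupons_alt, if_pos hn]
    rw [pyRange_one_nil 1 (n + 1) (by omega)]
    rfl
  · have hn' : ((n.toNat : Nat) : Int) = n := by omega
    rw [← hn']
    exact main_pos n.toNat (by omega)
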